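-- pv_equiv track=rewrite | github.com/dra2sun7/Coding | Lee_Hyeon_Ho/Programmers/Binary_Search/징검다리.py | solution
-- ===== SOURCE A (Python) =====
-- def solution(distance, rocks, n):
--     left = 1
--     right = distance
--
--     rocks.sort()
--     rocks.append(distance)
--
--     while left < right:
--         mid = (left + right) // 2
--         prev = 0
--         remove = 0
--         mn = distance
--         i = 0
--
--         while i < len(rocks):
--             gap = rocks[i] - prev
--             if gap < mid:
--                 remove += 1
--             else:
--                 if mn > gap:
--                     mn = gap
--
--                 prev = rocks[i]
--             i += 1
--         if remove == n:
--             return mn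
--         elif remove > n:
--             right = mid - 1
--         else:
--             left = mid + 1
--
--     return 0
-- ===== SOURCE B (Python) =====
-- def solution(distance, rocks, n):
--     rocks.sort()
--     rocks.append(distance)
--     total = len(rocks)
--
--     def surviving_gaps(mid):
--         # scan the stones carrying (last kept stone, list of surviving gaps)
--         prev, kept = 0, []
--         for s in rocks:
--             if s - prev >= mid:
--                 kept.append(s - prev)
--                 prev = s
--         return kept
--
--     def search(lo, hi):
--         if lo >= hi:
--             return 0
--         mid = lo + (hi - lo) // 2
--         kept = surviving_gaps(mid)
--         if total - len(kept) == n: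
--             return min([distance] + kept)
--         if n < total - len(kept):
--             return search(lo, mid - 1)
--         return search(mid + 1, hi)
--
--     return search(1, distance)
-- ===== Notes on version B (the rewrite author's own statement) =====
-- stated objective: alternative
-- what changed: A's iterative binary search with an inline three-accumulator index-driven while scan (prev/remove/mn) becomes a recursive search(lo,hi) with mid = lo + (hi-lo)//2 whose threshold test is a single for-loop collecting the list of surviving gaps, from which the removed count is total - len(kept) and the answer min([distance] + kept).
import Mathlib
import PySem

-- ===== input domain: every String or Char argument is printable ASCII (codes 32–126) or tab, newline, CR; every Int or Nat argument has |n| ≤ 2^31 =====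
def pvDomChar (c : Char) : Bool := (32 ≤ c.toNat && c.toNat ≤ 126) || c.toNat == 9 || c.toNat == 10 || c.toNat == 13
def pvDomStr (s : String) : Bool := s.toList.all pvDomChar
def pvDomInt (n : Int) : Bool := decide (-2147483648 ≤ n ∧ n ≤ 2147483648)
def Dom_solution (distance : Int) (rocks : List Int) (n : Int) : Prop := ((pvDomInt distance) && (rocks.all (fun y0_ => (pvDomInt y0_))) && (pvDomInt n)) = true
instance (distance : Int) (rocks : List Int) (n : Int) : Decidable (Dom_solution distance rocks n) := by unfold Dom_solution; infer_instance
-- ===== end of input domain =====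

-- B replaces A's iterative binary search (inline prev/remove/mn scan) by a recursive
-- search over lo + (hi-lo)//2 whose threshold test is a fold collecting the surviving
-- gaps (objective: alternative decomposition, same cost).
-- A mutates its 'rocks' argument in place (sort + append); B performs the same
-- mutation in Python; the equivalence proved here is about the return value only.

-- ===== PORT A =====
-- inner while: scans the rock list carrying (prev, remove, mn), exactly A's state
def pvInnerA (mid : Int) (rs : List Int) (prev remove mn : Int) : Int × Int :=
  match rs with
  | [] => (remove, mn)
  | r :: rest =>
      if r - prev < mid then pvInnerA mid rest prev (remove + 1) mn
      else pvInnerA mid rest r remove (if mn > r - prev then r - prev else mn)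

-- outer while left < right
def pvLoopA (distance : Int) (rs : List Int) (n : Int) (left right : Int) : Int :=
  if _h : left < right then
    let mid := PySem.Int.floordiv (left + right) 2
    let (remove, mn) := pvInnerA mid rs 0 0 distance
    if remove = n then mn
    else if remove > n then pvLoopA distance rs n left (mid - 1)
    else pvLoopA distance rs n (mid + 1) right
  else 0
termination_by (right - left).toNat
decreasing_by
  · have := PySem.Int.floordiv_two_mid_bounds (lo := left) (hi := right) (by omega)
    omega
  · have := PySem.Int.floordiv_two_mid_bounds (lo := left) (hi := right) (by omega)
    omega

def solution (distance : Int) (rocks : List Int) (n : Int) : Int :=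
  let rs := PySem.List.sorted rocks (fun x => x) ++ [distance]
  pvLoopA distance rs n 1 distance

-- ===== PORT B =====
-- surviving_gaps(mid): fold carrying (last kept stone, surviving-gap list)
def pvSurvB (mid : Int) (stones : List Int) : List Int :=
  (stones.foldl
    (fun st s => if s - st.1 ≥ mid then (s, st.2 ++ [s - st.1]) else st)
    ((0 : Int), ([] : List Int))).2

-- recursive binary search search(lo, hi)
def pvSearchB (d : Int) (stones : List Int) (tot n lo hi : Int) : Int :=
  if _g : lo ≥ hi then 0
  else
    let mid := lo + PySem.Int.floordiv (hi - lo) 2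
    let kept := pvSurvB mid stones
    if tot - (kept.length : Int) = n then
      match PySem.List.min? (d :: kept) (fun x => x) with
      | some m => m
      | none => 0     -- unreachable: the list is nonempty (Python's min never raises here)
    else if n < tot - (kept.length : Int) then pvSearchB d stones tot n lo (mid - 1)
    else pvSearchB d stones tot n (mid + 1) hi
termination_by (hi - lo).toNat
decreasing_by
  all_goals
    have h2 : PySem.Int.floordiv (hi - lo) 2 = (hi - lo) / 2 :=
      PySem.Int.floordiv_eq_ediv_of_pos (by omega)
    omega

def solution_alt (distance : Int) (rocks : List Int) (n : Int) : Int :=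
  let stones := PySem.List.sorted rocks (fun x => x) ++ [distance]
  pvSearchB distance stones (stones.length : Int) n 1 distance

-- ===== PRECONDITION & SPEC =====
def Spec_solution (distance : Int) (rocks : List Int) (n : Int) (out : Int) : Prop := out = solution_alt distance rocks n
instance (distance : Int) (rocks : List Int) (n : Int) (out : Int) : Decidable (Spec_solution distance rocks n out) := by unfold Spec_solution; infer_instance

-- ===== CLAIM (what is proved, stated in full; the proofs are below) =====
def Claim_equal_solution : Prop := ∀ (distance : Int) (rocks : List Int) (n : Int), Dom_solution distance rocks n → Spec_solution distance rocks n (solution distance rocks n)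

-- ===== LEMMAS AND PROOFS =====

-- proof-only recursive characterisation of the surviving gaps
def pvKept (mid : Int) (rs : List Int) (prev : Int) : List Int :=
  match rs with
  | [] => []
  | r :: rest =>
      if r - prev ≥ mid then (r - prev) :: pvKept mid rest r
      else pvKept mid rest prev

theorem pvSurvB_fold (mid : Int) (rs : List Int) (prev : Int) (acc : List Int) :
    (rs.foldl
      (fun st s => if s - st.1 ≥ mid then (s, st.2 ++ [s - st.1]) else st)
      (prev, acc)).2 = acc ++ pvKept mid rs prev := by
  induction rs generalizing prev acc with
  | nil => simp [pvKept]
  | cons r rest ih =>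
      by_cases h : r - prev ≥ mid
      · simp [pvKept, h, ih, List.append_assoc]
      · simp [pvKept, h, ih]

theorem pvSurvB_eq (mid : Int) (rs : List Int) :
    pvSurvB mid rs = pvKept mid rs 0 := by
  unfold pvSurvB
  simpa using pvSurvB_fold mid rs 0 []

-- A's inner scan equals (removed count, running min over the kept gaps)
theorem pvInnerA_eq (mid : Int) (rs : List Int) (prev remove mn : Int) :
    pvInnerA mid rs prev remove mn =
      (remove + ((rs.length : Int) - ((pvKept mid rs prev).length : Int)),
       (pvKept mid rs prev).foldl min mn) := by
  induction rs generalizing prev remove mn with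
  | nil => simp [pvInnerA, pvKept]
  | cons r rest ih =>
      by_cases h : r - prev < mid
      · have h' : ¬ (r - prev ≥ mid) := by omega
        simp only [pvInnerA, pvKept, if_pos h, if_neg h', ih, Prod.mk.injEq,
          List.length_cons]
        refine ⟨by push_cast; ring, trivial⟩
      · have h' : r - prev ≥ mid := by omega
        simp only [pvInnerA, pvKept, if_neg h, if_pos h', ih, Prod.mk.injEq,
          List.length_cons, List.foldl_cons]
        refine ⟨by push_cast; ring, ?_⟩
        congr 1
        by_cases hm : mn > r - prev <;> simp [hm, min_def]

theorem pvLoop_eq (distance : Int) (rs : List Int) (n lo hi : Int) :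
    pvLoopA distance rs n lo hi = pvSearchB distance rs (rs.length : Int) n lo hi := by
  rw [pvLoopA, pvSearchB]
  by_cases h : lo < hi
  · rw [dif_pos h, dif_neg (by omega)]
    have hmid : lo + PySem.Int.floordiv (hi - lo) 2 = PySem.Int.floordiv (lo + hi) 2 := by
      rw [PySem.Int.floordiv_eq_ediv_of_pos (by omega), PySem.Int.floordiv_eq_ediv_of_pos (by omega)]
      omega
    rw [hmid]
    simp only [pvInnerA_eq, pvSurvB_eq]
    set mid := PySem.Int.floordiv (lo + hi) 2 with hm
    have hz : (0 : Int) + ((rs.length : Int) - ((pvKept mid rs 0).length : Int))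
        = (rs.length : Int) - ((pvKept mid rs 0).length : Int) := by ring
    rw [hz]
    by_cases he : (rs.length : Int) - ((pvKept mid rs 0).length : Int) = n
    · rw [if_pos he, if_pos he, PySem.List.min?_id_cons]
    · rw [if_neg he, if_neg he]
      by_cases hg : (rs.length : Int) - ((pvKept mid rs 0).length : Int) > n
      · rw [if_pos hg, if_pos hg]
        exact pvLoop_eq distance rs n lo (mid - 1)
      · rw [if_neg hg, if_neg hg]
        exact pvLoop_eq distance rs n (mid + 1) hi
  · rw [dif_neg h, dif_pos (by omega)]
termination_by (hi - lo).toNat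
decreasing_by
  · have := PySem.Int.floordiv_two_mid_bounds (lo := lo) (hi := hi) (by omega)
    omega
  · have := PySem.Int.floordiv_two_mid_bounds (lo := lo) (hi := hi) (by omega)
    omega

-- ===== VERDICT (by name: the statement is the Claim_ definition above) =====
theorem solution_spec : Claim_equal_solution := by
  intro distance rocks n _
  unfold Spec_solution solution solution_alt
  exact pvLoop_eq _ _ _ _ _
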